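-- pv_equiv track=rewrite | github.com/tempranova/erasmiana-digital | processing/works/2-text-correction.py | remove_overlap_garbage
-- ===== SOURCE A (Python) =====
-- def remove_overlap_garbage(text, min_cluster_size=3, max_line_len=10):
--     """
--     Remove clusters of >= `min_cluster_size` consecutive short lines (each ≤ `max_line_len` chars).
--     """
--     lines = text.splitlines()
--     cleaned = []
--     cluster = []
--
--     def flush_cluster():
--         if len(cluster) >= min_cluster_size:
--             # Drop cluster entirely
--             cluster.clear()
--         else:
--             # Keep small accidental short sequences (like poetry)
--             cleaned.extend(cluster)
--             cluster.clear()
--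
--     for line in lines:
--         stripped = line.strip()
--         if stripped and len(stripped) <= max_line_len:
--             cluster.append(line)
--         else:
--             flush_cluster()
--             cleaned.append(line)
--     flush_cluster()  # handle trailing cluster
--
--     return "\n".join(cleaned)
-- ===== SOURCE B (Python) =====
-- def remove_overlap_garbage(text, min_cluster_size=3, max_line_len=10):
--     """
--     Remove clusters of >= `min_cluster_size` consecutive short lines (each <= `max_line_len` chars).
--     Runs-first decomposition: split the lines into maximal runs of equal "shortness",
--     then drop every short run that is large enough; no streaming cluster buffer.
--     """
--     def is_short(line):
--         s = line.strip()
--         return bool(s) and len(s) <= max_line_len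
--
--     lines = text.splitlines()
--     out = []
--     i = 0
--     n = len(lines)
--     while i < n:
--         flag = is_short(lines[i])
--         j = i + 1
--         while j < n and is_short(lines[j]) == flag:
--             j += 1
--         if not (flag and j - i >= min_cluster_size):
--             out.extend(lines[i:j])
--         i = j
--     return "\n".join(out)
-- ===== Notes on version B (the rewrite author's own statement) =====
-- stated objective: alternative
-- what changed: B splits splitlines() into maximal runs of consecutive lines that are equally short-or-not via an index-scanning run loop and drops each qualifying short run wholesale, instead of A's streaming pass with a mutable cluster buffer and flush helper.
import Mathlib
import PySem

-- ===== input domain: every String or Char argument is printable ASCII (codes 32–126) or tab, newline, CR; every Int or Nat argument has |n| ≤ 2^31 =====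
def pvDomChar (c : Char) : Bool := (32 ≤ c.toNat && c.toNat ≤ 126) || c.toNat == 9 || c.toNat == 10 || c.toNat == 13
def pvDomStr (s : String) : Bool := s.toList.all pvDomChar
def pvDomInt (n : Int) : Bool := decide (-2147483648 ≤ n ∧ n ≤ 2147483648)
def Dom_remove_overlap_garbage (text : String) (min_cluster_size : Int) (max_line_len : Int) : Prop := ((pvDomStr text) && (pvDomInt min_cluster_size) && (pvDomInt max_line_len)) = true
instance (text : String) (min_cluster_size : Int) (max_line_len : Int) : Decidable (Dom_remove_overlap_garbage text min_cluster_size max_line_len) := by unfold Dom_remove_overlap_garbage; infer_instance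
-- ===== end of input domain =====

-- B re-implements A by splitting the lines into maximal runs of equal "shortness" and
-- filtering whole runs, instead of streaming with a mutable cluster buffer (objective: alternative decomposition).

-- ===== PORT A =====
-- flush_cluster: drop the cluster if it is large enough, else append it to cleaned
def pvFlushA (min_cluster_size : Int) (st : List String × List String) : List String × List String :=
  if decide (min_cluster_size ≤ (st.2.length : Int)) then (st.1, []) else (st.1 ++ st.2, [])

-- the body of A's for-loop: state = (cleaned, cluster)
def pvStepA (min_cluster_size max_line_len : Int) (st : List String × List String) (line : String) : List String × List String :=
  let stripped := PySem.Str.strip line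
  if !(stripped == "") && decide ((PySem.Str.len stripped : Int) ≤ max_line_len) then
    (st.1, st.2 ++ [line])
  else
    let st' := pvFlushA min_cluster_size st   -- flush_cluster()
    (st'.1 ++ [line], st'.2)

def remove_overlap_garbage (text : String) (min_cluster_size : Int) (max_line_len : Int) : String :=
  let lines := PySem.Str.splitlines text
  let st := lines.foldl (pvStepA min_cluster_size max_line_len) ([], [])
  let st := pvFlushA min_cluster_size st      -- handle trailing cluster
  PySem.Str.join "\n" st.1

-- ===== PORT B =====
-- is_short(line)
def pvIsShort (max_line_len : Int) (line : String) : Bool :=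
  let s := PySem.Str.strip line
  !(s == "") && decide ((PySem.Str.len s : Int) ≤ max_line_len)

-- the outer while loop of B: take the maximal run carrying the head's flag, keep it
-- unless it is a droppable short cluster, continue after the run
def pvRunsB (min_cluster_size max_line_len : Int) : List String → List String
  | [] => []
  | x :: xs =>
    let flag := pvIsShort max_line_len x
    let run := x :: xs.takeWhile (fun y => pvIsShort max_line_len y == flag)
    let rest := xs.dropWhile (fun y => pvIsShort max_line_len y == flag)
    (if flag && decide (min_cluster_size ≤ (run.length : Int)) then [] else run) ++
      pvRunsB min_cluster_size max_line_len rest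
termination_by ls => ls.length
decreasing_by
  simp only [List.length_cons]
  exact Nat.lt_succ_of_le (List.length_dropWhile_le _ _)

def remove_overlap_garbage_alt (text : String) (min_cluster_size : Int) (max_line_len : Int) : String :=
  PySem.Str.join "\n" (pvRunsB min_cluster_size max_line_len (PySem.Str.splitlines text))

-- ===== PRECONDITION & SPEC =====
def Spec_remove_overlap_garbage (text : String) (min_cluster_size : Int) (max_line_len : Int) (out : String) : Prop := out = remove_overlap_garbage_alt text min_cluster_size max_line_len
instance (text : String) (min_cluster_size : Int) (max_line_len : Int) (out : String) : Decidable (Spec_remove_overlap_garbage text min_cluster_size max_line_len out) := by unfold Spec_remove_overlap_garbage; infer_instance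

-- ===== CLAIM (what is proved, stated in full; the proofs are below) =====
def Claim_equal_remove_overlap_garbage : Prop := ∀ (text : String) (min_cluster_size : Int) (max_line_len : Int), Dom_remove_overlap_garbage text min_cluster_size max_line_len → Spec_remove_overlap_garbage text min_cluster_size max_line_len (remove_overlap_garbage text min_cluster_size max_line_len)

-- ===== LEMMAS AND PROOFS =====

-- A's loop with the "cleaned" accumulator stripped off
def pvF (m L : Int) (c : List String) : List String → List String
  | [] => if decide (m ≤ (c.length : Int)) then [] else c
  | x :: xs =>
    if pvIsShort L x then pvF m L (c ++ [x]) xs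
    else (if decide (m ≤ (c.length : Int)) then [] else c) ++ x :: pvF m L [] xs

theorem pvStepA_eq (m L : Int) (st : List String × List String) (line : String) :
    pvStepA m L st line =
      if pvIsShort L line then (st.1, st.2 ++ [line])
      else ((pvFlushA m st).1 ++ [line], (pvFlushA m st).2) := rfl

theorem pvFlushA_fst (m : Int) (cleaned cluster : List String) :
    (pvFlushA m (cleaned, cluster)).1 =
      cleaned ++ (if decide (m ≤ (cluster.length : Int)) then [] else cluster) := by
  unfold pvFlushA; split <;> simp

theorem pvFlushA_snd (m : Int) (st : List String × List String) :
    (pvFlushA m st).2 = [] := by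
  unfold pvFlushA; split <;> simp

theorem pvFoldA_eq (m L : Int) :
    ∀ (ls cleaned cluster : List String),
      (pvFlushA m (ls.foldl (pvStepA m L) (cleaned, cluster))).1 =
        cleaned ++ pvF m L cluster ls := by
  intro ls
  induction ls with
  | nil =>
    intro cleaned cluster
    rw [List.foldl_nil, pvFlushA_fst]
    rfl
  | cons x xs ih =>
    intro cleaned cluster
    rw [List.foldl_cons, pvStepA_eq]
    by_cases h : pvIsShort L x
    · rw [if_pos h, ih]
      conv_rhs => rw [pvF]
      rw [if_pos h]
    · have h' : pvIsShort L x = false := by simpa using h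
      rw [if_neg (by simp [h']), pvFlushA_snd, ih, pvFlushA_fst]
      conv_rhs => rw [pvF]
      simp [h']

-- characterisation of pvF: it flushes c together with the leading short run, then continues
theorem pvF_char (m L : Int) :
    ∀ (ls c : List String),
      pvF m L c ls =
        (if decide (m ≤ (((c ++ ls.takeWhile (pvIsShort L)).length : Nat) : Int)) then []
         else c ++ ls.takeWhile (pvIsShort L)) ++
        (match ls.dropWhile (pvIsShort L) with
         | [] => []
         | x :: rest => x :: pvF m L [] rest) := by
  intro ls
  induction ls with
  | nil => intro c; simp [pvF]
  | cons x xs ih =>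
    intro c
    by_cases h : pvIsShort L x
    · rw [List.takeWhile_cons_of_pos h, List.dropWhile_cons_of_pos h]
      conv_lhs => rw [pvF]
      rw [if_pos h, ih (c ++ [x])]
      simp
    · rw [List.takeWhile_cons_of_neg (by simp [h]), List.dropWhile_cons_of_neg (by simp [h])]
      conv_lhs => rw [pvF]
      rw [if_neg (by simp [h])]
      simp

-- pvRunsB swallows a leading non-short line one at a time
theorem pvRunsB_nonshort_cons (m L : Int) (x : String) (xs : List String)
    (h : pvIsShort L x = false) :
    pvRunsB m L (x :: xs) = x :: pvRunsB m L xs := by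
  cases xs with
  | nil => rw [pvRunsB]; simp [h, pvRunsB]
  | cons z r =>
    by_cases hz : pvIsShort L z
    · rw [pvRunsB]
      rw [List.takeWhile_cons_of_neg (by simp [h, hz]), List.dropWhile_cons_of_neg (by simp [h, hz])]
      simp [h]
    · rw [pvRunsB]
      rw [List.takeWhile_cons_of_pos (by simp [h, hz]), List.dropWhile_cons_of_pos (by simp [h, hz])]
      conv_rhs => rw [pvRunsB]
      simp [h, hz]

theorem pvRunsB_eq_pvF (m L : Int) :
    ∀ (n : ℕ) (ls : List String), ls.length ≤ n → pvRunsB m L ls = pvF m L [] ls := by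
  intro n
  induction n with
  | zero =>
    intro ls hls
    rw [List.length_eq_zero_iff.mp (Nat.le_zero.mp hls)]
    rw [pvRunsB]
    simp [pvF]
  | succ n ih =>
    intro ls hls
    cases ls with
    | nil => rw [pvRunsB]; simp [pvF]
    | cons x xs =>
      have hxs : xs.length ≤ n := by
        simpa using Nat.succ_le_succ_iff.mp (by simpa using hls)
      by_cases h : pvIsShort L x
      · rw [pvRunsB]
        simp only [h, Bool.true_and]
        have hpred : (fun y => pvIsShort L y == true) = pvIsShort L := by
          funext y; simp
        rw [hpred]
        have hF : pvF m L [] (x :: xs) = pvF m L [x] xs := by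
          rw [pvF, if_pos h]; simp
        rw [hF, pvF_char]
        have hruns : pvRunsB m L (xs.dropWhile (pvIsShort L)) =
            (match xs.dropWhile (pvIsShort L) with
             | [] => []
             | y :: rest => y :: pvF m L [] rest) := by
          cases hdrop : xs.dropWhile (pvIsShort L) with
          | nil => rw [pvRunsB]
          | cons y rest =>
            have hy : pvIsShort L y = false := by
              have h0 := List.head?_dropWhile_not (pvIsShort L) xs
              rw [hdrop] at h0
              simpa using h0
            have hrest : rest.length ≤ n := by
              have := List.length_dropWhile_le (pvIsShort L) xs
              rw [hdrop] at this
              simp at this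
              omega
            rw [pvRunsB_nonshort_cons m L y rest hy, ih rest hrest]
        rw [hruns]
        simp
      · have h' : pvIsShort L x = false := by simpa using h
        rw [pvRunsB_nonshort_cons m L x xs h', ih xs hxs]
        conv_rhs => rw [pvF]
        rw [if_neg (by simp [h'])]
        simp

-- ===== VERDICT (by name: the statement is the Claim_ definition above) =====
theorem remove_overlap_garbage_spec : Claim_equal_remove_overlap_garbage := by
  intro text m L _
  unfold Spec_remove_overlap_garbage remove_overlap_garbage_alt
  show PySem.Str.join "\n"
      (pvFlushA m (List.foldl (pvStepA m L) ([], []) (PySem.Str.splitlines text))).1 = _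
  rw [pvFoldA_eq m L (PySem.Str.splitlines text) [] [],
      pvRunsB_eq_pvF m L (PySem.Str.splitlines text).length _ le_rfl]
  simp
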